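-- pv_equiv track=rewrite | github.com/kearn77/python-line-formatter | project_scripts/line_formatter.py | add_breaks
-- ===== SOURCE A (Python) =====
-- def add_breaks(text: str) -> str:
--     """
--     Adds a break tag - <br/> - to the end of a line.
--     """
--     input: list = text.split('\n')
--     lines: list[str] = (
--         [line + "<br/>" if line != '' else line
--             for line in input]
--         )
--     output: str = '\n'.join(lines)
--
--     return output
-- ===== SOURCE B (Python) =====
-- def add_breaks(text: str) -> str:
--     # Single pass over the characters: track whether we are inside a non-empty
--     # line; emit "<br/>" when such a run ends (at '\n' or at end of text).
--     out = []
--     run = False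
--     for ch in text:
--         if ch == '\n':
--             if run:
--                 out.append('<br/>')
--             out.append('\n')
--             run = False
--         else:
--             out.append(ch)
--             run = True
--     if run:
--         out.append('<br/>')
--     return ''.join(out)
-- ===== Notes on version B (the rewrite author's own statement) =====
-- stated objective: alternative
-- what changed: Replaces split-on-newline / per-line map / join with a single character-by-character pass that tracks an in-run flag and emits <br/> when a non-empty run of non-newline characters ends.
import Mathlib
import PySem

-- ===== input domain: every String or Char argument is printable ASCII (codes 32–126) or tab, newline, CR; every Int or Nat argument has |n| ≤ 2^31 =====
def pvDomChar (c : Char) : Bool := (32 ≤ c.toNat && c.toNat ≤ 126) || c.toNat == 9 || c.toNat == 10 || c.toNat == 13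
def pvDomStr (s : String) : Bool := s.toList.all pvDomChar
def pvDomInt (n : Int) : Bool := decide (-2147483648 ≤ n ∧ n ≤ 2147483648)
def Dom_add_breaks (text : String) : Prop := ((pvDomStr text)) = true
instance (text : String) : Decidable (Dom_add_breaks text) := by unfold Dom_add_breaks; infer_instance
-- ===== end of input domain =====

-- B replaces A's split/map/join with a single character pass tracking an in-run flag (alternative decomposition, same cost).

-- ===== PORT A =====
def add_breaks (text : String) : String :=
  let input : List String := (PySem.Str.split? text "\n").getD []
  let lines : List String := input.map (fun line => if line ≠ "" then line ++ "<br/>" else line)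
  let output : String := PySem.Str.join "\n" lines
  output

-- ===== PORT B =====
-- the loop of Source B: 'run' is the flag, the output list is built left to right
def brGo : List Char → Bool → List Char
  | [], run => if run then "<br/>".toList else []
  | c :: rest, run =>
    if c = '\n' then (if run then "<br/>".toList else []) ++ '\n' :: brGo rest false
    else c :: brGo rest true

def add_breaks_alt (text : String) : String := String.ofList (brGo text.toList false)

-- ===== PRECONDITION & SPEC =====
def Spec_add_breaks (text : String) (out : String) : Prop := out = add_breaks_alt text
instance (text : String) (out : String) : Decidable (Spec_add_breaks text out) := by unfold Spec_add_breaks; infer_instance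

-- ===== CLAIM (what is proved, stated in full; the proofs are below) =====
def Claim_equal_add_breaks : Prop := ∀ (text : String), Dom_add_breaks text → Spec_add_breaks text (add_breaks text)

-- ===== LEMMAS AND PROOFS =====

-- specification of splitting at '\n'
def splitNL : List Char → List (List Char)
  | [] => [[]]
  | c :: rest => if c = '\n' then [] :: splitNL rest else (splitNL rest).modifyHead (c :: ·)

-- per-line transform of A, on char lists
def fLine (p : List Char) : List Char := if p = [] then p else p ++ "<br/>".toList

-- the tail of the joined-and-tagged output
def jTail : List (List Char) → List Char
  | [] => []
  | p :: ps => '\n' :: (fLine p ++ jTail ps)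

theorem splitNL_ne_nil (l : List Char) : splitNL l ≠ [] := by
  induction l with
  | nil => simp [splitNL]
  | cons c rest ih =>
    simp only [splitNL]
    split
    · simp
    · cases h : splitNL rest with
      | nil => exact absurd h ih
      | cons p ps => simp [List.modifyHead]

theorem splitOn_go_nl (fuel : Nat) : ∀ (l cur : List Char) (accs : List (List Char)),
    l.length ≤ fuel →
    PySem.Chars.splitOn.go ['\n'] fuel l cur accs = accs.reverse ++ (splitNL l).modifyHead (cur.reverse ++ ·) := by
  induction fuel with
  | zero =>
    intro l cur accs hl
    have : l = [] := List.length_eq_zero_iff.mp (Nat.le_zero.mp hl)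
    subst this
    simp [PySem.Chars.splitOn.go, splitNL, List.modifyHead]
  | succ f ih =>
    intro l cur accs hl
    cases l with
    | nil => simp [PySem.Chars.splitOn.go, splitNL, List.modifyHead]
    | cons c rest =>
      simp only [PySem.Chars.splitOn.go]
      by_cases hc : c = '\n'
      · subst hc
        have hpre : ['\n'].isPrefixOf ('\n' :: rest) = true := by simp [List.isPrefixOf]
        rw [if_pos hpre]
        have := ih rest [] (cur.reverse :: accs) (by simpa using Nat.le_of_succ_le_succ hl)
        rw [show List.drop (['\n'] : List Char).length ('\n' :: rest) = rest from rfl, this]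
        simp only [List.reverse_cons, List.append_assoc, List.singleton_append]
        have hs : splitNL ('\n' :: rest) = [] :: splitNL rest := by simp [splitNL]
        rw [hs]
        cases h : splitNL rest with
        | nil => exact absurd h (splitNL_ne_nil rest)
        | cons p ps => simp [List.modifyHead]
      · have hpre : ['\n'].isPrefixOf (c :: rest) = false := by
          simp [List.isPrefixOf]
          exact fun h => (hc h.symm).elim
        rw [if_neg (by simp [hpre])]
        have := ih rest (c :: cur) accs (by simpa using Nat.le_of_succ_le_succ hl)
        rw [this]
        have hs : splitNL (c :: rest) = (splitNL rest).modifyHead (c :: ·) := by simp [splitNL, hc]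
        rw [hs]
        cases h : splitNL rest with
        | nil => exact absurd h (splitNL_ne_nil rest)
        | cons p ps => simp [List.modifyHead]

theorem splitOn_eq_splitNL (s : List Char) : PySem.Chars.splitOn s ['\n'] = splitNL s := by
  unfold PySem.Chars.splitOn
  rw [splitOn_go_nl (s.length + 1) s [] [] (Nat.le_succ _)]
  cases h : splitNL s with
  | nil => exact absurd h (splitNL_ne_nil s)
  | cons p ps => simp [List.modifyHead]

theorem brGo_eq (l : List Char) : ∀ (b : Bool),
    brGo l b =
      (match splitNL l with
        | [] => []
        | p :: ps => (if b || !p.isEmpty then p ++ "<br/>".toList else p) ++ jTail ps) := by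
  induction l with
  | nil => intro b; cases b <;> simp [brGo, splitNL, jTail]
  | cons c rest ih =>
    intro b
    by_cases hc : c = '\n'
    · subst hc
      have hs : splitNL ('\n' :: rest) = [] :: splitNL rest := by simp [splitNL]
      rw [show brGo ('\n' :: rest) b =
            (if b then "<br/>".toList else []) ++ '\n' :: brGo rest false from by simp [brGo]]
      rw [ih false, hs]
      cases h : splitNL rest with
      | nil => exact absurd h (splitNL_ne_nil rest)
      | cons p ps =>
        cases b <;> simp [jTail, fLine]
    · have hs : splitNL (c :: rest) = (splitNL rest).modifyHead (c :: ·) := by simp [splitNL, hc]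
      rw [show brGo (c :: rest) b = c :: brGo rest true from by simp [brGo, hc]]
      rw [ih true, hs]
      cases h : splitNL rest with
      | nil => exact absurd h (splitNL_ne_nil rest)
      | cons p ps => simp [List.modifyHead]

theorem join_fLine (ps : List (List Char)) : ∀ (p : List Char),
    PySem.Chars.join ['\n'] ((p :: ps).map fLine) = fLine p ++ jTail ps := by
  induction ps with
  | nil => intro p; simp [PySem.Chars.join_singleton, jTail]
  | cons q qs ih =>
    intro p
    simp only [List.map_cons] at *
    rw [PySem.Chars.join_cons_cons, ih q]
    simp [jTail]

theorem to_list_fLine (p : List Char) :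
    (if String.ofList p ≠ "" then String.ofList p ++ "<br/>" else String.ofList p).toList = fLine p := by
  by_cases hp : p = []
  · subst hp; simp [fLine]
  · have : String.ofList p ≠ "" := by
      intro h
      exact hp (by simpa using congrArg String.toList h)
    simp [this, fLine, hp, String.toList_append]

-- ===== VERDICT (by name: the statement is the Claim_ definition above) =====
theorem add_breaks_spec : Claim_equal_add_breaks := by
  intro text _
  unfold Spec_add_breaks add_breaks add_breaks_alt
  simp only [PySem.Str.split?, PySem.Chars.split?, PySem.Str.join]
  rw [show ("\n" : String).toList = ['\n'] from rfl, splitOn_eq_splitNL]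
  apply congrArg String.ofList
  have hmaps : ((((splitNL text.toList).map String.ofList).map
      (fun line => if line ≠ "" then line ++ "<br/>" else line)).map String.toList)
      = (splitNL text.toList).map fLine := by
    rw [List.map_map, List.map_map]
    apply List.map_congr_left
    intro p _
    exact to_list_fLine p
  simp only [List.isEmpty_cons, Bool.false_eq_true, if_false, Option.map_some, Option.getD_some]
  rw [hmaps]
  cases h : splitNL text.toList with
  | nil => exact absurd h (splitNL_ne_nil _)
  | cons p ps =>
    rw [join_fLine ps p, brGo_eq text.toList false, h]
    simp [fLine]
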